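-- pv_equiv track=rewrite | github.com/SrikanthAmudala/PythonWorkShopConcordia | Week2/ex_codingInterview_sum.py | sum_of_list
-- ===== SOURCE A (Python) =====
-- def sum_of_list(x):
-- 	digit = 0
-- 	for i in x:
-- 		digit = 10 *  digit + i
-- 	digit+=1
-- 	temp = []
--
-- 	while digit>0:
-- 		temp.append(digit%10)
-- 		digit=digit//10
--
-- 	return [temp[i] for i in range(len(temp)-1, -1, -1)]
-- ===== SOURCE B (Python) =====
-- def sum_of_list(x):
--     # Single pass of carry propagation from the least significant digit,
--     # then the leftover carry's own digits, then drop leading zeros.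
--     carry = 1
--     rev = []                      # digits of the result, least significant first
--     for d in reversed(x):
--         carry, r = divmod(d + carry, 10)
--         rev.append(r)
--     while carry > 0:
--         carry, r = divmod(carry, 10)
--         rev.append(r)
--     out = rev[::-1]
--     k = 0
--     while k < len(out) and out[k] == 0:
--         k += 1
--     return out[k:]
-- ===== Notes on version B (the rewrite author's own statement) =====
-- stated objective: faster
-- what changed: A converts the digit list into one big integer with Horner's rule and then re-extracts all decimal digits of that integer; B never builds the big integer: one right-to-left pass propagating a carry per position, then the leftover carry's own digits, then dropping leading zeros. Pre_ excludes lists denoting an integer less than minus one, where incrementing has no digit-list answer: A returns an empty result there (its extraction loop never runs) and B returns a digit residue of its carry pass; both values are accidental.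
-- outside the precondition, e.g. on sum_of_list([-5]): A returns [], B returns [6]; on sum_of_list([-1, 1]): A returns [], B returns [9, 2]
import Mathlib
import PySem

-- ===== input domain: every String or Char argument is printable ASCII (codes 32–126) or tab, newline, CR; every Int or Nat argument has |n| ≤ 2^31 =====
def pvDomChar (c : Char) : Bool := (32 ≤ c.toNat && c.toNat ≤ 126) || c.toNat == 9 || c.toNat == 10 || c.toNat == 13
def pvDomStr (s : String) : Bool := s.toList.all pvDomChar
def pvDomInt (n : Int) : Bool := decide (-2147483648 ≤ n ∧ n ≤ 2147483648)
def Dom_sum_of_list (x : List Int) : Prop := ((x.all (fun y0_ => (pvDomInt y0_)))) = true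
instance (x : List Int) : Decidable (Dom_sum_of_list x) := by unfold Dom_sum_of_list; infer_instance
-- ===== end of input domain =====

-- B replaces A's big-integer Horner conversion by a single carry-propagation pass (measured asymptotically faster).


-- ===== PORT A =====
-- shared helper: the identical 'while v>0: acc.append(v%10); v//=10' loop occurring verbatim in both Pythons
def pyDigitsLoop (v : Int) (acc : List Int) : List Int :=
  if _h : 0 < v then pyDigitsLoop (PySem.Int.floordiv v 10) (acc ++ [PySem.Int.mod v 10]) else acc
termination_by v.toNat
decreasing_by
  rw [PySem.Int.floordiv_eq_ediv_of_pos (by norm_num)]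
  omega

def sum_of_list (x : List Int) : List Int :=
  -- digit = 0; for i in x: digit = 10*digit + i
  let digit := x.foldl (fun d i => 10 * d + i) 0
  -- digit += 1
  let digit := digit + 1
  -- temp = []; while digit > 0: temp.append(digit % 10); digit = digit // 10
  let temp := pyDigitsLoop digit []
  -- [temp[i] for i in range(len(temp)-1, -1, -1)]  (i is always a valid index, so pyGetD's default is never used)
  (PySem.List.pyRange ((temp.length : Int) - 1) (-1) (-1)).map (fun i => PySem.List.pyGetD temp i 0)

-- ===== PORT B =====
-- the final 'k' loop of Source B: skip the leading zeros of out and return out[k:]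
def stripLeadingZeros (out : List Int) : List Int :=
  match out with
  | [] => []
  | d :: t => if d = 0 then stripLeadingZeros t else d :: t

def sum_of_list_alt (x : List Int) : List Int :=
  -- carry = 1; rev = []; for d in reversed(x): carry, r = divmod(d + carry, 10); rev.append(r)
  let s := x.reverse.foldl
    (fun (s : Int × List Int) d =>
      (PySem.Int.floordiv (d + s.1) 10, s.2 ++ [PySem.Int.mod (d + s.1) 10]))
    (1, [])
  -- while carry > 0: carry, r = divmod(carry, 10); rev.append(r)
  let rev := pyDigitsLoop s.1 s.2
  -- out = rev[::-1]; k-loop drops leading zeros; return out[k:]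
  stripLeadingZeros rev.reverse

-- ===== PRECONDITION & SPEC =====
-- the integer a big-endian digit list denotes (spec-level, used only by Pre_)
def decValue : List Int → Int
  | [] => 0
  | d :: t => d * 10 ^ t.length + decValue t

-- Pre_ excludes lists denoting an integer less than minus one: incrementing such a list has no digit-list
-- answer; A returns an empty result there (its extraction loop never runs) and B a digit residue
-- of its carry pass: both values are accidental.
def Pre_sum_of_list (x : List Int) : Prop := -1 ≤ decValue x
instance (x : List Int) : Decidable (Pre_sum_of_list x) := by unfold Pre_sum_of_list; infer_instance

def pvWitness_sum_of_list : List Int := [1, 2, 3]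

def Spec_sum_of_list (x : List Int) (out : List Int) : Prop := out = sum_of_list_alt x
instance (x : List Int) (out : List Int) : Decidable (Spec_sum_of_list x out) := by unfold Spec_sum_of_list; infer_instance

-- ===== CLAIM (what is proved, stated in full; the proofs are below) =====
def Claim_equal_sum_of_list : Prop := ∀ (x : List Int), Dom_sum_of_list x → Pre_sum_of_list x → Spec_sum_of_list x (sum_of_list x)

-- ===== LEMMAS AND PROOFS =====

-- value of a little-endian digit list
def valLE : List Int → Int
  | [] => 0
  | d :: t => d + 10 * valLE t

-- B's fold body, named for the proofs
def cfF : (Int × List Int) → Int → (Int × List Int) :=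
  fun s d => (PySem.Int.floordiv (d + s.1) 10, s.2 ++ [PySem.Int.mod (d + s.1) 10])

def digitsOK (M : List Int) : Prop := ∀ r ∈ M, 0 ≤ r ∧ r < 10

theorem valLE_concat (N M : List Int) :
    valLE (N ++ M) = valLE N + valLE M * 10 ^ N.length := by
  induction N with
  | nil => simp [valLE]
  | cons a t ih => simp [valLE, ih, pow_succ]; ring

theorem valLE_append (N : List Int) (d : Int) :
    valLE (N ++ [d]) = valLE N + d * 10 ^ N.length := by
  rw [valLE_concat]; simp [valLE]

theorem horner_eq_valLE (x : List Int) (a : Int) :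
    x.foldl (fun d i => 10 * d + i) a = a * 10 ^ x.length + valLE x.reverse := by
  induction x generalizing a with
  | nil => simp [valLE]
  | cons d t ih =>
    simp only [List.foldl_cons, List.reverse_cons, ih, valLE_append, List.length_cons,
      List.length_reverse]
    ring

theorem decValue_eq_valLE (x : List Int) : decValue x = valLE x.reverse := by
  induction x with
  | nil => simp [decValue, valLE]
  | cons d t ih =>
    simp only [decValue, List.reverse_cons, valLE_append, ih, List.length_reverse]
    ring

theorem pyDigitsLoop_append (v : Int) (acc : List Int) :
    pyDigitsLoop v acc = acc ++ pyDigitsLoop v [] := by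
  by_cases h : 0 < v
  · rw [pyDigitsLoop, dif_pos h]
    conv_rhs => rw [pyDigitsLoop, dif_pos h]
    rw [pyDigitsLoop_append (PySem.Int.floordiv v 10) (acc ++ [PySem.Int.mod v 10]),
        pyDigitsLoop_append (PySem.Int.floordiv v 10) ([] ++ [PySem.Int.mod v 10])]
    simp
  · rw [pyDigitsLoop, dif_neg h]
    conv_rhs => rw [pyDigitsLoop, dif_neg h]
    simp
termination_by v.toNat
decreasing_by all_goals (rw [PySem.Int.floordiv_eq_ediv_of_pos (by norm_num)]; omega)

theorem pyDigitsLoop_nonpos {v : Int} (h : ¬ 0 < v) : pyDigitsLoop v [] = [] := by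
  rw [pyDigitsLoop, dif_neg h]

theorem valLE_nonneg {M : List Int} (h : digitsOK M) : 0 ≤ valLE M := by
  induction M with
  | nil => simp [valLE]
  | cons d t ih =>
    have hd := h d (by simp)
    have := ih (fun r hr => h r (by simp [hr]))
    simp only [valLE]; omega

theorem valLE_lt {M : List Int} (h : digitsOK M) : valLE M < 10 ^ M.length := by
  induction M with
  | nil => simp [valLE]
  | cons d t ih =>
    have hd := h d (by simp)
    have := ih (fun r hr => h r (by simp [hr]))
    simp only [valLE, List.length_cons, pow_succ]
    omega

theorem valLE_pos {M : List Int} (h : digitsOK M) (hne : M ≠ [])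
    (hl : M.getLast hne ≠ 0) : 0 < valLE M := by
  induction M with
  | nil => exact absurd rfl hne
  | cons d t ih =>
    have hd := h d (by simp)
    have ht : digitsOK t := fun r hr => h r (by simp [hr])
    by_cases hte : t = []
    · subst hte
      simp only [List.getLast_singleton] at hl
      simp only [valLE]; omega
    · have := ih ht hte (by rwa [List.getLast_cons hte] at hl)
      simp only [valLE]; omega

theorem mod_ten (r v : Int) (h0 : 0 ≤ r) (h1 : r < 10) :
    PySem.Int.mod (r + 10 * v) 10 = r := by
  rw [PySem.Int.mod_eq_emod_of_pos (by norm_num)]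
  omega

theorem floordiv_ten (r v : Int) (h0 : 0 ≤ r) (h1 : r < 10) :
    PySem.Int.floordiv (r + 10 * v) 10 = v := by
  rw [PySem.Int.floordiv_eq_ediv_of_pos (by norm_num)]
  omega

-- the digits loop on a nonnegative value yields decimal digits of that value
theorem digitsLoop_spec (c : Int) (h : 0 ≤ c) :
    digitsOK (pyDigitsLoop c []) ∧ valLE (pyDigitsLoop c []) = c := by
  by_cases hc : 0 < c
  · have hmod0 := PySem.Int.mod_nonneg c (b := 10) (by norm_num)
    have hmod1 := PySem.Int.mod_lt c (b := 10) (by norm_num)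
    have hdm := PySem.Int.floordiv_mul_add_mod c 10
    have hdivnn : 0 ≤ PySem.Int.floordiv c 10 := by
      rw [PySem.Int.floordiv_eq_ediv_of_pos (by norm_num)]; omega
    obtain ⟨ihok, ihval⟩ := digitsLoop_spec (PySem.Int.floordiv c 10) hdivnn
    rw [pyDigitsLoop, dif_pos hc, pyDigitsLoop_append]
    constructor
    · intro r hr
      simp only [List.nil_append, List.cons_append, List.mem_cons] at hr
      rcases hr with rfl | hr
      · exact ⟨hmod0, hmod1⟩
      · exact ihok r (by simpa using hr)
    · simp only [List.nil_append, List.cons_append, valLE, ihval]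
      omega
  · have h0 : c = 0 := by omega
    subst h0
    rw [pyDigitsLoop_nonpos hc]
    simp [digitsOK, valLE]
termination_by c.toNat
decreasing_by rw [PySem.Int.floordiv_eq_ediv_of_pos (by norm_num)]; omega

-- exact representation: a little-endian digit list without trailing zero round-trips
theorem digitsLoop_valLE {M : List Int} (h : digitsOK M) (hne : M ≠ [])
    (hl : M.getLast hne ≠ 0) : pyDigitsLoop (valLE M) [] = M := by
  induction M with
  | nil => exact absurd rfl hne
  | cons r t ih =>
    have hr := h r (by simp)
    have ht : digitsOK t := fun a ha => h a (by simp [ha])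
    by_cases hte : t = []
    · subst hte
      simp only [List.getLast_singleton] at hl
      have hm : valLE [r] = r + 10 * 0 := by simp [valLE]
      rw [pyDigitsLoop, dif_pos (by simp only [valLE]; omega), hm,
        mod_ten r 0 hr.1 hr.2, floordiv_ten r 0 hr.1 hr.2, pyDigitsLoop_append]
      simp [pyDigitsLoop_nonpos (show ¬(0:Int) < 0 by norm_num)]
    · have hlt : t.getLast hte ≠ 0 := by rwa [List.getLast_cons hte] at hl
      have hv : 0 < valLE t := valLE_pos ht hte hlt
      have hm : valLE (r :: t) = r + 10 * valLE t := rfl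
      rw [hm, pyDigitsLoop, dif_pos (by omega),
        mod_ten r (valLE t) hr.1 hr.2, floordiv_ten r (valLE t) hr.1 hr.2,
        pyDigitsLoop_append]
      simp [ih ht hte hlt]

-- reversed digits of valLE M are M.reverse without its leading zeros
theorem digitsLoop_strip (M : List Int) (h : digitsOK M) :
    (pyDigitsLoop (valLE M) []).reverse = stripLeadingZeros M.reverse := by
  induction M using List.reverseRecOn with
  | nil => simp [valLE, pyDigitsLoop_nonpos, stripLeadingZeros]
  | append_singleton N d ih =>
    have hN : digitsOK N := fun a ha => h a (by simp [ha])
    by_cases hd : d = 0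
    · subst hd
      rw [valLE_append]
      simp only [zero_mul, add_zero, List.reverse_append, List.reverse_cons,
        List.reverse_nil, List.nil_append, List.cons_append, List.nil_append]
      rw [ih hN]
      simp [stripLeadingZeros]
    · have hne : N ++ [d] ≠ [] := by simp
      have hl : (N ++ [d]).getLast hne ≠ 0 := by
        rwa [List.getLast_append_singleton]
      rw [digitsLoop_valLE h hne hl]
      simp [stripLeadingZeros, hd]

-- A's closing comprehension reverses temp
theorem comprehension_reverse (temp : List Int) :
    (PySem.List.pyRange ((temp.length : Int) - 1) (-1) (-1)).map
      (fun i => PySem.List.pyGetD temp i 0) = temp.reverse := by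
  rw [PySem.List.pyRange_neg_one_eq_reverse]
  have h1 : (-1 : Int) + 1 = 0 := by norm_num
  have h2 : ((temp.length : Int) - 1) + 1 = (temp.length : Int) := by ring
  rw [h1, h2, List.map_reverse, PySem.List.map_pyGetD_pyRange_zero']

-- invariant of B's carry fold
theorem cf_acc (l : List Int) (c : Int) (acc : List Int) :
    l.foldl cfF (c, acc) = ((l.foldl cfF (c, [])).1, acc ++ (l.foldl cfF (c, [])).2) := by
  induction l generalizing c acc with
  | nil => simp
  | cons d t ih =>
    simp only [List.foldl_cons, cfF]
    rw [ih, ih (PySem.Int.floordiv (d + c) 10) ([] ++ [PySem.Int.mod (d + c) 10])]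
    simp

theorem cf_invariant (l : List Int) (c0 : Int) :
    digitsOK (l.foldl cfF (c0, [])).2 ∧
    (l.foldl cfF (c0, [])).2.length = l.length ∧
    (l.foldl cfF (c0, [])).1 * 10 ^ l.length + valLE (l.foldl cfF (c0, [])).2
      = valLE l + c0 := by
  induction l generalizing c0 with
  | nil => simp [valLE, digitsOK]
  | cons d t ih =>
    have hstep : (d :: t).foldl cfF (c0, []) = t.foldl cfF (cfF (c0, []) d) := rfl
    have hc1 := ih (PySem.Int.floordiv (d + c0) 10)
    obtain ⟨hd, hlen, hval⟩ := hc1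
    have hmod0 := PySem.Int.mod_nonneg (d + c0) (b := 10) (by norm_num)
    have hmod1 := PySem.Int.mod_lt (d + c0) (b := 10) (by norm_num)
    have hdm := PySem.Int.floordiv_mul_add_mod (d + c0) 10
    rw [hstep]
    have hcfF : cfF (c0, []) d
        = (PySem.Int.floordiv (d + c0) 10, [] ++ [PySem.Int.mod (d + c0) 10]) := rfl
    rw [hcfF]
    rw [cf_acc t (PySem.Int.floordiv (d + c0) 10) ([] ++ [PySem.Int.mod (d + c0) 10])]
    refine ⟨?_, by simpa using hlen, ?_⟩
    · intro r hr
      simp only [List.nil_append, List.cons_append, List.mem_cons] at hr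
      rcases hr with rfl | hr
      · exact ⟨hmod0, hmod1⟩
      · exact hd r (by simpa using hr)
    · simp only [List.nil_append, List.cons_append, valLE, List.length_cons, pow_succ]
      nlinarith [hval]

-- ===== VERDICT (by name: the statement is the Claim_ definition above) =====
theorem sum_of_list_spec : Claim_equal_sum_of_list := by
  intro x _ hpre
  unfold Spec_sum_of_list sum_of_list sum_of_list_alt
  have hfold : x.reverse.foldl
      (fun (s : Int × List Int) d =>
        (PySem.Int.floordiv (d + s.1) 10, s.2 ++ [PySem.Int.mod (d + s.1) 10]))
      (1, []) = x.reverse.foldl cfF (1, []) := rfl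
  rw [hfold]
  set s := x.reverse.foldl cfF (1, []) with hs
  obtain ⟨hdig, hlen, hval⟩ := cf_invariant x.reverse 1
  rw [← hs] at hdig hlen hval
  have hn : x.reverse.length = s.2.length := hlen.symm
  rw [hn] at hval
  -- the incremented number, expressed two ways
  have hhorner := horner_eq_valLE x 0
  have hdigit : x.foldl (fun d i => 10 * d + i) 0 + 1
      = valLE s.2 + s.1 * 10 ^ s.2.length := by
    rw [hhorner]; omega
  -- Pre_ makes the incremented number nonnegative, hence the final carry nonnegative
  unfold Pre_sum_of_list at hpre
  rw [decValue_eq_valLE] at hpre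
  have hlt := valLE_lt hdig
  have hnn := valLE_nonneg hdig
  have hNnn : 0 ≤ valLE s.2 + s.1 * 10 ^ s.2.length := by omega
  have hpow : (0:Int) < 10 ^ s.2.length := by positivity
  have hcarry : 0 ≤ s.1 := by nlinarith
  obtain ⟨hcok, hcval⟩ := digitsLoop_spec s.1 hcarry
  -- both sides are about M := s.2 ++ digits(s.1)
  rw [comprehension_reverse, hdigit, pyDigitsLoop_append]
  have hM : valLE (s.2 ++ pyDigitsLoop s.1 []) = valLE s.2 + s.1 * 10 ^ s.2.length := by
    rw [valLE_concat, hcval]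
  have hMok : digitsOK (s.2 ++ pyDigitsLoop s.1 []) := by
    intro r hr
    rcases List.mem_append.mp hr with h1 | h2
    · exact hdig r h1
    · exact hcok r h2
  rw [← hM]
  simp only [List.nil_append]
  show (pyDigitsLoop (valLE (s.2 ++ pyDigitsLoop s.1 [])) []).reverse
      = stripLeadingZeros (pyDigitsLoop s.1 s.2).reverse
  rw [pyDigitsLoop_append s.1 s.2]
  exact digitsLoop_strip _ hMok
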